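-- pv_equiv track=rewrite | github.com/aminpepezethun/adventOfCode | 2015/day11/day11.py | pairExist
-- ===== SOURCE A (Python) =====
-- def pairExist(psswd: list[str]) -> bool:
--     n = len(psswd)
--     pairs = 0
--     i = 0
--
--     while i < n -1:
--         if psswd[i] == psswd[i+1]:
--             pairs += 1
--             i += 2
--         else:
--             i += 1
--
--     return pairs == 2
-- ===== SOURCE B (Python) =====
-- def pairExist(psswd: list[str]) -> bool:
--     # run-length grouping: each maximal run of equal elements contributes len(run)//2 pairs
--     total = 0
--     i = 0
--     n = len(psswd)
--     while i < n:
--         j = i + 1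
--         while j < n and psswd[j] == psswd[i]:
--             j += 1
--         total += (j - i) // 2
--         i = j
--     return total == 2
-- ===== Notes on version B (the rewrite author's own statement) =====
-- stated objective: alternative
-- what changed: Replaces the greedy index scan that skips by 2 after each matched pair with a run-length grouping pass: each maximal run of equal elements contributes len(run)//2 pairs, summed and compared to 2.
import Mathlib
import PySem

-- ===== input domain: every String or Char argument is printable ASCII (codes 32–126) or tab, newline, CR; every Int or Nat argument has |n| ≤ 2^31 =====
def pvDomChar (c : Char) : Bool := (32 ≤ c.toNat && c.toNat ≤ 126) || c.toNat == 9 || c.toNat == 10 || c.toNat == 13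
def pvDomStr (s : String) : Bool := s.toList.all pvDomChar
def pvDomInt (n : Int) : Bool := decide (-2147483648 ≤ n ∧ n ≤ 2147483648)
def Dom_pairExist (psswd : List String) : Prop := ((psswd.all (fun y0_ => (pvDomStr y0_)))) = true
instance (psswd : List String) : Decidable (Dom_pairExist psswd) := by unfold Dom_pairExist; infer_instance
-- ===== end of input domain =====

-- B replaces A's greedy skip-by-2 index scan with a run-length grouping pass (alternative, same cost).

-- ===== PORT A =====
-- A's while loop over index i: compares psswd[i] with psswd[i+1], counts a pair and skips 2
-- on a match, else advances by 1; ported as the obvious structural recursion over the list.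
def pairLoopA : List String → Nat
  | a :: b :: t => if a == b then 1 + pairLoopA t else pairLoopA (b :: t)
  | _ => 0

def pairExist (psswd : List String) : Bool := pairLoopA psswd == 2

-- ===== PORT B =====
-- B's outer while loop peels one maximal run per iteration (inner while = takeWhile scan),
-- adding (run length)//2 each time.
def runSumB : List String → Nat
  | [] => 0
  | a :: t =>
    (1 + (t.takeWhile (fun x => x == a)).length) / 2 + runSumB (t.dropWhile (fun x => x == a))
termination_by l => l.length
decreasing_by
  simpa using Nat.lt_succ_of_le (List.length_dropWhile_le _ _)

def pairExist_alt (psswd : List String) : Bool := runSumB psswd == 2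

-- ===== PRECONDITION & SPEC =====
def Spec_pairExist (psswd : List String) (out : Bool) : Prop := out = pairExist_alt psswd
instance (psswd : List String) (out : Bool) : Decidable (Spec_pairExist psswd out) := by unfold Spec_pairExist; infer_instance

-- ===== CLAIM (what is proved, stated in full; the proofs are below) =====
def Claim_equal_pairExist : Prop := ∀ (psswd : List String), Dom_pairExist psswd → Spec_pairExist psswd (pairExist psswd)

-- ===== LEMMAS AND PROOFS =====

-- the greedy scan over a run of k equal elements followed by a non-matching (or empty) tail
-- yields exactly k/2 pairs from the run
lemma pairLoopA_replicate (k : Nat) (a : String) (t : List String)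
    (ht : t.takeWhile (fun x => x == a) = []) :
    pairLoopA (List.replicate k a ++ t) = k / 2 + pairLoopA t := by
  induction k using Nat.strong_induction_on with
  | _ k ih =>
    match k with
    | 0 => simp
    | 1 =>
      cases t with
      | nil => simp [pairLoopA]
      | cons b t' =>
        have hb : (b == a) = false := by
          by_contra h
          simp [List.takeWhile, eq_true_of_ne_false h] at ht
        have hab : (a == b) = false := by
          simp only [beq_eq_false_iff_ne] at hb ⊢
          exact fun h => hb h.symm
        simp [pairLoopA, hab]
    | (k + 2) =>
      have : List.replicate (k + 2) a ++ t = a :: a :: (List.replicate k a ++ t) := by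
        simp [List.replicate_succ]
      rw [this]
      have hrec := ih k (by omega)
      simp only [pairLoopA, beq_self_eq_true, if_true, hrec]
      omega

lemma takeWhile_beq_eq_replicate (a : String) (t : List String) :
    t.takeWhile (fun x => x == a)
      = List.replicate (t.takeWhile (fun x => x == a)).length a := by
  induction t with
  | nil => simp
  | cons b t' ih =>
    by_cases h : (b == a) = true
    · have hba : b = a := by simpa using h
      subst hba
      simp only [List.takeWhile_cons, beq_self_eq_true, if_true, List.length_cons,
        List.replicate_succ]
      exact congrArg (List.cons b) ih
    · simp [List.takeWhile, h]

lemma takeWhile_dropWhile_nil (p : String → Bool) (t : List String) :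
    (t.dropWhile p).takeWhile p = [] := by
  induction t with
  | nil => simp
  | cons b t' ih =>
    by_cases h : p b = true
    · simpa [List.dropWhile, h] using ih
    · simp [List.dropWhile, h]

lemma pairLoopA_eq_runSumB : ∀ (n : Nat) (l : List String), l.length ≤ n →
    pairLoopA l = runSumB l := by
  intro n
  induction n with
  | zero =>
    intro l hl
    have : l = [] := List.eq_nil_of_length_eq_zero (Nat.le_zero.mp hl)
    simp [this, pairLoopA, runSumB]
  | succ n ih =>
    intro l hl
    cases l with
    | nil => simp [pairLoopA, runSumB]
    | cons a t =>
      have hsplit : a :: t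
          = List.replicate (1 + (t.takeWhile (fun x => x == a)).length) a
              ++ t.dropWhile (fun x => x == a) := by
        rw [Nat.add_comm, List.replicate_succ]
        conv_lhs => rw [← List.takeWhile_append_dropWhile (p := fun x => x == a) (l := t)]
        rw [← List.cons_append, ← takeWhile_beq_eq_replicate]
      have hlen : (t.dropWhile (fun x => x == a)).length ≤ n := by
        have := List.length_dropWhile_le (fun x => x == a) t
        simp at hl
        omega
      calc pairLoopA (a :: t)
          = (1 + (t.takeWhile (fun x => x == a)).length) / 2
              + pairLoopA (t.dropWhile (fun x => x == a)) := by
            conv_lhs => rw [hsplit]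
            exact pairLoopA_replicate _ _ _ (takeWhile_dropWhile_nil _ _)
        _ = (1 + (t.takeWhile (fun x => x == a)).length) / 2
              + runSumB (t.dropWhile (fun x => x == a)) := by rw [ih _ hlen]
        _ = runSumB (a :: t) := by rw [runSumB]

-- ===== VERDICT (by name: the statement is the Claim_ definition above) =====
theorem pairExist_spec : Claim_equal_pairExist := by
  intro psswd _
  unfold Spec_pairExist pairExist pairExist_alt
  rw [pairLoopA_eq_runSumB psswd.length psswd (le_refl _)]
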